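-- pv_equiv track=rewrite | github.com/DengBoCong/text-similarity | sim/pytorch/__init__.py | bert_variable_mapping
-- ===== SOURCE A (Python) =====
-- def bert_variable_mapping(num_hidden_layers: int, prefix_: str = ""):
--     """映射到官方BERT权重格式
--     :param num_hidden_layers: encoder的层数
--     :param prefix_: 如果是对项目内的bert组件进行组合用以适配任务，那么在加载
--                     标准bert权重的时候，由于pytorch权重命名规则，可能会需要prefix
--     """
--     mapping = {
--         prefix_ + "token_embeddings.weight": "bert.embeddings.word_embeddings.weight",
--         prefix_ + "bert_embeddings.segment_embeddings.weight": "bert.embeddings.token_type_embeddings.weight",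
--         prefix_ + "bert_embeddings.position_embeddings.weight": "bert.embeddings.position_embeddings.weight",
--         prefix_ + "bert_embeddings.layer_norm.weight": "bert.embeddings.LayerNorm.weight",
--         prefix_ + "bert_embeddings.layer_norm.bias": "bert.embeddings.LayerNorm.bias",
--         prefix_ + "bert_output.pooler_dense.weight": "bert.pooler.dense.weight",
--         prefix_ + "bert_output.pooler_dense.bias": "bert.pooler.dense.bias",
--         prefix_ + "bert_output.nsp_prob.weight": "cls.seq_relationship.weight",
--         prefix_ + "bert_output.nsp_prob.bias": "cls.seq_relationship.bias",
--         prefix_ + "bert_output.mlm_decoder.weight": "cls.predictions.decoder.weight",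
--         prefix_ + "bert_output.mlm_dense.weight": "cls.predictions.transform.dense.weight",
--         prefix_ + "bert_output.mlm_dense.bias": "cls.predictions.transform.dense.bias",
--         prefix_ + "bert_output.mlm_norm.weight": "cls.predictions.transform.LayerNorm.weight",
--         prefix_ + "bert_output.mlm_norm.bias": "cls.predictions.transform.LayerNorm.bias",
--         prefix_ + "bert_output.mlm_bias.weight": "cls.predictions.bias"
--     }
--
--     for i in range(num_hidden_layers):
--         prefix = f"bert.encoder.layer.{i}."
--         mapping.update({
--             f"{prefix_}bert_layer_{i}.bert_self_attention.query_dense.weight": prefix + "attention.self.query.weight",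
--             f"{prefix_}bert_layer_{i}.bert_self_attention.query_dense.bias": prefix + "attention.self.query.bias",
--             f"{prefix_}bert_layer_{i}.bert_self_attention.key_dense.weight": prefix + "attention.self.key.weight",
--             f"{prefix_}bert_layer_{i}.bert_self_attention.key_dense.bias": prefix + "attention.self.key.bias",
--             f"{prefix_}bert_layer_{i}.bert_self_attention.value_dense.weight": prefix + "attention.self.value.weight",
--             f"{prefix_}bert_layer_{i}.bert_self_attention.value_dense.bias": prefix + "attention.self.value.bias",
--             f"{prefix_}bert_layer_{i}.bert_self_attention.output_dense.weight": prefix + "attention.output.dense.weight",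
--             f"{prefix_}bert_layer_{i}.bert_self_attention.output_dense.bias": prefix + "attention.output.dense.bias",
--             f"{prefix_}bert_layer_{i}.attn_norm.weight": prefix + "attention.output.LayerNorm.weight",
--             f"{prefix_}bert_layer_{i}.attn_norm.bias": prefix + "attention.output.LayerNorm.bias",
--             f"{prefix_}bert_layer_{i}.feedforward.input_dense.weight": prefix + "intermediate.dense.weight",
--             f"{prefix_}bert_layer_{i}.feedforward.input_dense.bias": prefix + "intermediate.dense.bias",
--             f"{prefix_}bert_layer_{i}.feedforward.output_dense.weight": prefix + "output.dense.weight",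
--             f"{prefix_}bert_layer_{i}.feedforward.output_dense.bias": prefix + "output.dense.bias",
--             f"{prefix_}bert_layer_{i}.feedforward_norm.weight": prefix + "output.LayerNorm.weight",
--             f"{prefix_}bert_layer_{i}.feedforward_norm.bias": prefix + "output.LayerNorm.bias"
--         })
--
--     return mapping
-- ===== SOURCE B (Python) =====
-- # Generative reimplementation: instead of hard-coded full-name dict literals, the
-- # mapping is generated from per-MODULE tables (local module, official module,
-- # parameter-name pairs) by expanding each module with its parameters.
--
-- _WB = [("weight", "weight"), ("bias", "bias")]
-- _W = [("weight", "weight")]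
--
-- # (local module, official module, [(local param, official param), ...])
-- _BASE_MODULES = [
--     ("token_embeddings", "bert.embeddings.word_embeddings", _W),
--     ("bert_embeddings.segment_embeddings", "bert.embeddings.token_type_embeddings", _W),
--     ("bert_embeddings.position_embeddings", "bert.embeddings.position_embeddings", _W),
--     ("bert_embeddings.layer_norm", "bert.embeddings.LayerNorm", _WB),
--     ("bert_output.pooler_dense", "bert.pooler.dense", _WB),
--     ("bert_output.nsp_prob", "cls.seq_relationship", _WB),
--     ("bert_output.mlm_decoder", "cls.predictions.decoder", _W),
--     ("bert_output.mlm_dense", "cls.predictions.transform.dense", _WB),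
--     ("bert_output.mlm_norm", "cls.predictions.transform.LayerNorm", _WB),
--     ("bert_output.mlm_bias", "cls.predictions", [("weight", "bias")]),
-- ]
--
-- # each encoder-layer module has both weight and bias
-- _LAYER_MODULES = [
--     ("bert_self_attention.query_dense", "attention.self.query"),
--     ("bert_self_attention.key_dense", "attention.self.key"),
--     ("bert_self_attention.value_dense", "attention.self.value"),
--     ("bert_self_attention.output_dense", "attention.output.dense"),
--     ("attn_norm", "attention.output.LayerNorm"),
--     ("feedforward.input_dense", "intermediate.dense"),
--     ("feedforward.output_dense", "output.dense"),
--     ("feedforward_norm", "output.LayerNorm"),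
-- ]
--
--
-- def bert_variable_mapping(num_hidden_layers: int, prefix_: str = ""):
--     mapping = {}
--     for local, official, params in _BASE_MODULES:
--         for lp, op in params:
--             mapping[f"{prefix_}{local}.{lp}"] = f"{official}.{op}"
--     for i in range(num_hidden_layers):
--         for local, official in _LAYER_MODULES:
--             for lp, op in _WB:
--                 mapping[f"{prefix_}bert_layer_{i}.{local}.{lp}"] = f"bert.encoder.layer.{i}.{official}.{op}"
--     return mapping
-- ===== Notes on version B (the rewrite author's own statement) =====
-- stated objective: alternative
-- what changed: Replaces the hard-coded full-name dict literals by per-module template tables (local module, official module, parameter pairs): the mapping is generated by expanding each module with its parameter names, instead of listing every complete key/value string.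
import Mathlib
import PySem

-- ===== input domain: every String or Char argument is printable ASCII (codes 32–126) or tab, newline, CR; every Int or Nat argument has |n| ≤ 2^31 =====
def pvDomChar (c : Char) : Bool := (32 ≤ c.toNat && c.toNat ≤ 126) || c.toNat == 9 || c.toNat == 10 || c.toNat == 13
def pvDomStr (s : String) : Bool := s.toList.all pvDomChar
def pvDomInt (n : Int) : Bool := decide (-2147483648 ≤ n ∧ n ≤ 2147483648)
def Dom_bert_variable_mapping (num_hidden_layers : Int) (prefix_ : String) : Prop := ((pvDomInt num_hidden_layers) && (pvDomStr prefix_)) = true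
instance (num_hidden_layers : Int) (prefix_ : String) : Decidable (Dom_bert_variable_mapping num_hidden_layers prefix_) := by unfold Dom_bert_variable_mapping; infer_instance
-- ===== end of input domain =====

-- B generates the mapping from per-module template tables (local module, official module,
-- parameter-name pairs) instead of A's hard-coded full-name dict literals (objective: alternative).

-- ===== PORT A =====
def bert_variable_mapping (num_hidden_layers : Int) (prefix_ : String) : List (String × String) :=
  let mapping : PySem.Dict String String := PySem.Dict.ofList [
    (prefix_ ++ "token_embeddings.weight", "bert.embeddings.word_embeddings.weight"),
    (prefix_ ++ "bert_embeddings.segment_embeddings.weight", "bert.embeddings.token_type_embeddings.weight"),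
    (prefix_ ++ "bert_embeddings.position_embeddings.weight", "bert.embeddings.position_embeddings.weight"),
    (prefix_ ++ "bert_embeddings.layer_norm.weight", "bert.embeddings.LayerNorm.weight"),
    (prefix_ ++ "bert_embeddings.layer_norm.bias", "bert.embeddings.LayerNorm.bias"),
    (prefix_ ++ "bert_output.pooler_dense.weight", "bert.pooler.dense.weight"),
    (prefix_ ++ "bert_output.pooler_dense.bias", "bert.pooler.dense.bias"),
    (prefix_ ++ "bert_output.nsp_prob.weight", "cls.seq_relationship.weight"),
    (prefix_ ++ "bert_output.nsp_prob.bias", "cls.seq_relationship.bias"),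
    (prefix_ ++ "bert_output.mlm_decoder.weight", "cls.predictions.decoder.weight"),
    (prefix_ ++ "bert_output.mlm_dense.weight", "cls.predictions.transform.dense.weight"),
    (prefix_ ++ "bert_output.mlm_dense.bias", "cls.predictions.transform.dense.bias"),
    (prefix_ ++ "bert_output.mlm_norm.weight", "cls.predictions.transform.LayerNorm.weight"),
    (prefix_ ++ "bert_output.mlm_norm.bias", "cls.predictions.transform.LayerNorm.bias"),
    (prefix_ ++ "bert_output.mlm_bias.weight", "cls.predictions.bias")]
  let mapping := (PySem.List.pyRange 0 num_hidden_layers 1).foldl (fun mapping i =>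
    let pfx := "bert.encoder.layer." ++ PySem.Int.toStr i ++ "."
    mapping.update [
      (prefix_ ++ "bert_layer_" ++ PySem.Int.toStr i ++ ".bert_self_attention.query_dense.weight", pfx ++ "attention.self.query.weight"),
      (prefix_ ++ "bert_layer_" ++ PySem.Int.toStr i ++ ".bert_self_attention.query_dense.bias", pfx ++ "attention.self.query.bias"),
      (prefix_ ++ "bert_layer_" ++ PySem.Int.toStr i ++ ".bert_self_attention.key_dense.weight", pfx ++ "attention.self.key.weight"),
      (prefix_ ++ "bert_layer_" ++ PySem.Int.toStr i ++ ".bert_self_attention.key_dense.bias", pfx ++ "attention.self.key.bias"),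
      (prefix_ ++ "bert_layer_" ++ PySem.Int.toStr i ++ ".bert_self_attention.value_dense.weight", pfx ++ "attention.self.value.weight"),
      (prefix_ ++ "bert_layer_" ++ PySem.Int.toStr i ++ ".bert_self_attention.value_dense.bias", pfx ++ "attention.self.value.bias"),
      (prefix_ ++ "bert_layer_" ++ PySem.Int.toStr i ++ ".bert_self_attention.output_dense.weight", pfx ++ "attention.output.dense.weight"),
      (prefix_ ++ "bert_layer_" ++ PySem.Int.toStr i ++ ".bert_self_attention.output_dense.bias", pfx ++ "attention.output.dense.bias"),
      (prefix_ ++ "bert_layer_" ++ PySem.Int.toStr i ++ ".attn_norm.weight", pfx ++ "attention.output.LayerNorm.weight"),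
      (prefix_ ++ "bert_layer_" ++ PySem.Int.toStr i ++ ".attn_norm.bias", pfx ++ "attention.output.LayerNorm.bias"),
      (prefix_ ++ "bert_layer_" ++ PySem.Int.toStr i ++ ".feedforward.input_dense.weight", pfx ++ "intermediate.dense.weight"),
      (prefix_ ++ "bert_layer_" ++ PySem.Int.toStr i ++ ".feedforward.input_dense.bias", pfx ++ "intermediate.dense.bias"),
      (prefix_ ++ "bert_layer_" ++ PySem.Int.toStr i ++ ".feedforward.output_dense.weight", pfx ++ "output.dense.weight"),
      (prefix_ ++ "bert_layer_" ++ PySem.Int.toStr i ++ ".feedforward.output_dense.bias", pfx ++ "output.dense.bias"),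
      (prefix_ ++ "bert_layer_" ++ PySem.Int.toStr i ++ ".feedforward_norm.weight", pfx ++ "output.LayerNorm.weight"),
      (prefix_ ++ "bert_layer_" ++ PySem.Int.toStr i ++ ".feedforward_norm.bias", pfx ++ "output.LayerNorm.bias")]) mapping
  mapping.items

-- ===== PORT B =====
-- parameter-name pair tables
def pvWB : List (String × String) := [("weight", "weight"), ("bias", "bias")]
def pvW : List (String × String) := [("weight", "weight")]

-- (local module, official module, parameter pairs)
def pvBaseModules : List (String × String × List (String × String)) := [
  ("token_embeddings", "bert.embeddings.word_embeddings", pvW),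
  ("bert_embeddings.segment_embeddings", "bert.embeddings.token_type_embeddings", pvW),
  ("bert_embeddings.position_embeddings", "bert.embeddings.position_embeddings", pvW),
  ("bert_embeddings.layer_norm", "bert.embeddings.LayerNorm", pvWB),
  ("bert_output.pooler_dense", "bert.pooler.dense", pvWB),
  ("bert_output.nsp_prob", "cls.seq_relationship", pvWB),
  ("bert_output.mlm_decoder", "cls.predictions.decoder", pvW),
  ("bert_output.mlm_dense", "cls.predictions.transform.dense", pvWB),
  ("bert_output.mlm_norm", "cls.predictions.transform.LayerNorm", pvWB),
  ("bert_output.mlm_bias", "cls.predictions", [("weight", "bias")])]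

def pvLayerModules : List (String × String) := [
  ("bert_self_attention.query_dense", "attention.self.query"),
  ("bert_self_attention.key_dense", "attention.self.key"),
  ("bert_self_attention.value_dense", "attention.self.value"),
  ("bert_self_attention.output_dense", "attention.output.dense"),
  ("attn_norm", "attention.output.LayerNorm"),
  ("feedforward.input_dense", "intermediate.dense"),
  ("feedforward.output_dense", "output.dense"),
  ("feedforward_norm", "output.LayerNorm")]

def bert_variable_mapping_alt (num_hidden_layers : Int) (prefix_ : String) : List (String × String) :=
  let mapping : PySem.Dict String String :=
    pvBaseModules.foldl (fun mapping t =>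
      t.2.2.foldl (fun mapping pr =>
        mapping.insert (prefix_ ++ t.1 ++ "." ++ pr.1) (t.2.1 ++ "." ++ pr.2)) mapping)
      PySem.Dict.empty
  let mapping := (PySem.List.pyRange 0 num_hidden_layers 1).foldl (fun mapping i =>
    pvLayerModules.foldl (fun mapping t =>
      pvWB.foldl (fun mapping pr =>
        mapping.insert (prefix_ ++ "bert_layer_" ++ PySem.Int.toStr i ++ "." ++ t.1 ++ "." ++ pr.1)
          ("bert.encoder.layer." ++ PySem.Int.toStr i ++ "." ++ t.2 ++ "." ++ pr.2)) mapping) mapping) mapping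
  mapping.items

-- ===== PRECONDITION & SPEC =====
def Spec_bert_variable_mapping (num_hidden_layers : Int) (prefix_ : String) (out : List (String × String)) : Prop := out = bert_variable_mapping_alt num_hidden_layers prefix_
instance (num_hidden_layers : Int) (prefix_ : String) (out : List (String × String)) : Decidable (Spec_bert_variable_mapping num_hidden_layers prefix_ out) := by unfold Spec_bert_variable_mapping; infer_instance

-- ===== CLAIM (what is proved, stated in full; the proofs are below) =====
def Claim_equal_bert_variable_mapping : Prop := ∀ (num_hidden_layers : Int) (prefix_ : String), Dom_bert_variable_mapping num_hidden_layers prefix_ → Spec_bert_variable_mapping num_hidden_layers prefix_ (bert_variable_mapping num_hidden_layers prefix_)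

-- ===== LEMMAS AND PROOFS =====

theorem pv_base_dict_eq (p : String) :
    pvBaseModules.foldl (fun (mapping : PySem.Dict String String) t =>
      t.2.2.foldl (fun mapping pr =>
        mapping.insert (p ++ t.1 ++ "." ++ pr.1) (t.2.1 ++ "." ++ pr.2)) mapping)
      PySem.Dict.empty =
    PySem.Dict.ofList [
      (p ++ "token_embeddings.weight", "bert.embeddings.word_embeddings.weight"),
      (p ++ "bert_embeddings.segment_embeddings.weight", "bert.embeddings.token_type_embeddings.weight"),
      (p ++ "bert_embeddings.position_embeddings.weight", "bert.embeddings.position_embeddings.weight"),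
      (p ++ "bert_embeddings.layer_norm.weight", "bert.embeddings.LayerNorm.weight"),
      (p ++ "bert_embeddings.layer_norm.bias", "bert.embeddings.LayerNorm.bias"),
      (p ++ "bert_output.pooler_dense.weight", "bert.pooler.dense.weight"),
      (p ++ "bert_output.pooler_dense.bias", "bert.pooler.dense.bias"),
      (p ++ "bert_output.nsp_prob.weight", "cls.seq_relationship.weight"),
      (p ++ "bert_output.nsp_prob.bias", "cls.seq_relationship.bias"),
      (p ++ "bert_output.mlm_decoder.weight", "cls.predictions.decoder.weight"),
      (p ++ "bert_output.mlm_dense.weight", "cls.predictions.transform.dense.weight"),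
      (p ++ "bert_output.mlm_dense.bias", "cls.predictions.transform.dense.bias"),
      (p ++ "bert_output.mlm_norm.weight", "cls.predictions.transform.LayerNorm.weight"),
      (p ++ "bert_output.mlm_norm.bias", "cls.predictions.transform.LayerNorm.bias"),
      (p ++ "bert_output.mlm_bias.weight", "cls.predictions.bias")] := by
  simp [pvBaseModules, pvW, pvWB, PySem.Dict.ofList, PySem.Dict.update, List.foldl,
        String.append_assoc]

theorem pv_layer_step_eq (p : String) :
    (fun (mapping : PySem.Dict String String) (i : Int) =>
      pvLayerModules.foldl (fun mapping t =>
        pvWB.foldl (fun mapping pr =>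
          mapping.insert (p ++ "bert_layer_" ++ PySem.Int.toStr i ++ "." ++ t.1 ++ "." ++ pr.1)
            ("bert.encoder.layer." ++ PySem.Int.toStr i ++ "." ++ t.2 ++ "." ++ pr.2)) mapping) mapping) =
    (fun (mapping : PySem.Dict String String) (i : Int) =>
      let pfx := "bert.encoder.layer." ++ PySem.Int.toStr i ++ "."
      mapping.update [
        (p ++ "bert_layer_" ++ PySem.Int.toStr i ++ ".bert_self_attention.query_dense.weight", pfx ++ "attention.self.query.weight"),
        (p ++ "bert_layer_" ++ PySem.Int.toStr i ++ ".bert_self_attention.query_dense.bias", pfx ++ "attention.self.query.bias"),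
        (p ++ "bert_layer_" ++ PySem.Int.toStr i ++ ".bert_self_attention.key_dense.weight", pfx ++ "attention.self.key.weight"),
        (p ++ "bert_layer_" ++ PySem.Int.toStr i ++ ".bert_self_attention.key_dense.bias", pfx ++ "attention.self.key.bias"),
        (p ++ "bert_layer_" ++ PySem.Int.toStr i ++ ".bert_self_attention.value_dense.weight", pfx ++ "attention.self.value.weight"),
        (p ++ "bert_layer_" ++ PySem.Int.toStr i ++ ".bert_self_attention.value_dense.bias", pfx ++ "attention.self.value.bias"),
        (p ++ "bert_layer_" ++ PySem.Int.toStr i ++ ".bert_self_attention.output_dense.weight", pfx ++ "attention.output.dense.weight"),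
        (p ++ "bert_layer_" ++ PySem.Int.toStr i ++ ".bert_self_attention.output_dense.bias", pfx ++ "attention.output.dense.bias"),
        (p ++ "bert_layer_" ++ PySem.Int.toStr i ++ ".attn_norm.weight", pfx ++ "attention.output.LayerNorm.weight"),
        (p ++ "bert_layer_" ++ PySem.Int.toStr i ++ ".attn_norm.bias", pfx ++ "attention.output.LayerNorm.bias"),
        (p ++ "bert_layer_" ++ PySem.Int.toStr i ++ ".feedforward.input_dense.weight", pfx ++ "intermediate.dense.weight"),
        (p ++ "bert_layer_" ++ PySem.Int.toStr i ++ ".feedforward.input_dense.bias", pfx ++ "intermediate.dense.bias"),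
        (p ++ "bert_layer_" ++ PySem.Int.toStr i ++ ".feedforward.output_dense.weight", pfx ++ "output.dense.weight"),
        (p ++ "bert_layer_" ++ PySem.Int.toStr i ++ ".feedforward.output_dense.bias", pfx ++ "output.dense.bias"),
        (p ++ "bert_layer_" ++ PySem.Int.toStr i ++ ".feedforward_norm.weight", pfx ++ "output.LayerNorm.weight"),
        (p ++ "bert_layer_" ++ PySem.Int.toStr i ++ ".feedforward_norm.bias", pfx ++ "output.LayerNorm.bias")]) := by
  funext mapping i
  simp [pvLayerModules, pvWB, PySem.Dict.update, List.foldl, String.append_assoc]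

-- ===== VERDICT (by name: the statement is the Claim_ definition above) =====
set_option maxHeartbeats 1600000 in
theorem bert_variable_mapping_spec : Claim_equal_bert_variable_mapping := by
  intro n p _
  unfold Spec_bert_variable_mapping bert_variable_mapping bert_variable_mapping_alt
  rw [pv_base_dict_eq, pv_layer_step_eq]
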